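-- pv_equiv track=rewrite | github.com/micmetta/Esame-Teconologie-del-Linguaggio-Naturale | Progetti_esame/Di Caro/Esercitazione 5 - Topic modelling e Text Visualization/Esercitazione 5 - TM e TV/Topic_Modelling_Text_Visualization.py | rimozione_punteggiatura_da_un_documento
-- ===== SOURCE A (Python) =====
-- def rimozione_punteggiatura_da_un_documento(documento):
--
--     punc = '''!()-[]{};:'"\,<>./?@#$%^&*_~\n'''
--     nuovo_documento = []
--
--     for frase in documento:
--         nuova_frase = []
--         #for i in range(0, len(frase)):
--         frase_splittata = frase.split(" ")
--         for parola in frase_splittata: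
--             parola_corrente = ""
--             for c in parola:  # per ogni carattere della parola corrente
--                 non_aggiungere_carattere = False
--                 for el in punc:
--                     if el == c:
--                         non_aggiungere_carattere = True
--                 if not non_aggiungere_carattere:
--                     parola_corrente = parola_corrente + str(c)
--
--             nuova_frase.append(parola_corrente)
--
--         nuovo_documento.append(nuova_frase)
--
--     return nuovo_documento
-- ===== SOURCE B (Python) =====
-- def rimozione_punteggiatura_da_un_documento(documento):
--     punc = '''!()-[]{};:'"\,<>./?@#$%^&*_~\n'''
--     return [''.join(c for c in frase if c not in punc).split(' ')
--             for frase in documento]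
-- ===== Notes on version B (the rewrite author's own statement) =====
-- stated objective: idiomatic
-- what changed: B deletes punctuation from the whole sentence with one filtering join before a single split(' '), replacing A's per-word character loop with its inner per-character scan over the punctuation string and quadratic string-concatenation accumulator.
import Mathlib
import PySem

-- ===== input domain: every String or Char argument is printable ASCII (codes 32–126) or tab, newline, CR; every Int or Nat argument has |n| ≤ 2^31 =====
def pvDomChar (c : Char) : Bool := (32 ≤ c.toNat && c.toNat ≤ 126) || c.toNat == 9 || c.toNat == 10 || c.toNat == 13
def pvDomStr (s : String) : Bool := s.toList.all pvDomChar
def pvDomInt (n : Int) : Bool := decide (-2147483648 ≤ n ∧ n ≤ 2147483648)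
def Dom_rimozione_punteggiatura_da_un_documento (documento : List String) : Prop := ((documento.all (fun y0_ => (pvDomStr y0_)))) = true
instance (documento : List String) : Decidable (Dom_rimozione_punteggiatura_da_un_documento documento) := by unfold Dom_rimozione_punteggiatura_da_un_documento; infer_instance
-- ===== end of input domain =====

-- B strips punctuation from the whole sentence with one filter before a single split,
-- instead of A's per-word loop with an inner per-character scan; objective: idiomatic.

-- ===== PORT A =====
-- the punctuation alphabet of A (note: contains '\' and ',' from the Python "\," and a newline)
def puncA : List Char := "!()-[]{};:'\"\\,<>./?@#$%^&*_~\n".toList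

def rimozione_punteggiatura_da_un_documento (documento : List String) : List (List String) :=
  documento.foldl (fun nuovo_documento frase =>
    let frase_splittata := PySem.Chars.splitOn frase.toList [' ']   -- frase.split(" ")
    let nuova_frase := frase_splittata.foldl (fun nuova_frase parola =>
      let parola_corrente := parola.foldl (fun parola_corrente c =>
        let non_aggiungere_carattere :=
          puncA.foldl (fun flag el => if el == c then true else flag) false
        if !non_aggiungere_carattere then parola_corrente ++ [c] else parola_corrente)
        ([] : List Char)
      nuova_frase ++ [String.ofList parola_corrente]) []
    nuovo_documento ++ [nuova_frase]) []

-- ===== PORT B =====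
def puncB : List Char := "!()-[]{};:'\"\\,<>./?@#$%^&*_~\n".toList

def rimozione_punteggiatura_da_un_documento_alt (documento : List String) : List (List String) :=
  documento.map (fun frase =>
    (PySem.Chars.splitOn (frase.toList.filter (fun c => !puncB.contains c)) [' ']).map String.ofList)

-- ===== PRECONDITION & SPEC =====
def Spec_rimozione_punteggiatura_da_un_documento (documento : List String) (out : List (List String)) : Prop := out = rimozione_punteggiatura_da_un_documento_alt documento
instance (documento : List String) (out : List (List String)) : Decidable (Spec_rimozione_punteggiatura_da_un_documento documento out) := by unfold Spec_rimozione_punteggiatura_da_un_documento; infer_instance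

-- ===== CLAIM (what is proved, stated in full; the proofs are below) =====
def Claim_equal_rimozione_punteggiatura_da_un_documento : Prop := ∀ (documento : List String), Dom_rimozione_punteggiatura_da_un_documento documento → Spec_rimozione_punteggiatura_da_un_documento documento (rimozione_punteggiatura_da_un_documento documento)

-- ===== LEMMAS AND PROOFS =====

-- a simple structural characterisation of splitting on a single space: (first word, remaining words)
def pvSplit : List Char → List Char × List (List Char)
  | [] => ([], [])
  | x :: xs =>
    let r := pvSplit xs
    if x = ' ' then ([], r.1 :: r.2) else (x :: r.1, r.2)

theorem pvSplit_go (l : List Char) : ∀ (fuel : Nat) (cur : List Char) (acc : List (List Char)),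
    l.length ≤ fuel →
    PySem.Chars.splitOn.go [' '] (fuel + 1) l cur acc
      = acc.reverse ++ (cur.reverse ++ (pvSplit l).1) :: (pvSplit l).2 := by
  induction l with
  | nil =>
    intro fuel cur acc _
    rw [PySem.Chars.splitOn.go.eq_def]
    simp [pvSplit]
  | cons c rest ih =>
    intro fuel cur acc h
    cases fuel with
    | zero => simp at h
    | succ f =>
      rw [PySem.Chars.splitOn.go.eq_def]
      simp only [List.isPrefixOf]
      by_cases hc : c = ' '
      · subst hc
        rw [if_pos (by simp)]
        have := ih f [] (cur.reverse :: acc) (by simp at h; omega)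
        simp only [List.length_cons, List.length_nil, List.drop_succ_cons, List.drop_zero]
        rw [this]
        simp [pvSplit]
      · rw [if_neg (by simp; intro h'; exact absurd h'.symm hc)]
        rw [ih f (c :: cur) acc (by simp at h; omega)]
        simp [pvSplit, hc]

theorem splitOn_space (cs : List Char) :
    PySem.Chars.splitOn cs [' '] = (pvSplit cs).1 :: (pvSplit cs).2 := by
  unfold PySem.Chars.splitOn
  rw [pvSplit_go cs cs.length [] [] (le_refl _)]
  simp

-- filtering a space-preserving predicate commutes with splitting on the space
theorem pvSplit_filter (q : Char → Bool) (hq : q ' ' = true) (cs : List Char) :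
    pvSplit (cs.filter q) = ((pvSplit cs).1.filter q, (pvSplit cs).2.map (List.filter q)) := by
  induction cs with
  | nil => simp [pvSplit]
  | cons x xs ih =>
    by_cases hx : x = ' '
    · subst hx
      simp [pvSplit, hq, ih]
    · by_cases hqx : q x = true
      · simp [pvSplit, hqx, hx, ih]
      · simp only [Bool.not_eq_true] at hqx
        simp [pvSplit, hqx, hx, ih]

-- the inner accumulator flag is just membership in puncA
theorem flag_eq (c : Char) (l : List Char) : ∀ (b : Bool),
    l.foldl (fun flag el => if el == c then true else flag) b = (b || l.contains c) := by
  induction l with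
  | nil => simp
  | cons e es ih =>
    intro b
    rw [List.foldl_cons, ih]
    by_cases he : e = c
    · subst he; cases b <;> simp
    · simp only [List.contains_cons]
      cases b <;> simp [he, Ne.symm he]

-- A's per-character keep test is the plain membership test
theorem body_eq : (fun (pc : List Char) (c : Char) =>
      let non_aggiungere_carattere :=
        puncA.foldl (fun flag el => if el == c then true else flag) false
      if !non_aggiungere_carattere then pc ++ [c] else pc)
    = (fun pc c => if c ∈ puncA then pc else pc ++ [c]) := by
  funext pc c
  rw [show (puncA.foldl (fun flag el => if el == c then true else flag) false)
      = (false || puncA.contains c) from flag_eq c puncA false]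
  by_cases hc : c ∈ puncA <;> simp [hc]

-- A's per-character keep loop is a filter
theorem word_eq (w : List Char) (acc : List Char) :
    w.foldl (fun pc c => if c ∈ puncA then pc else pc ++ [c]) acc
    = acc ++ w.filter (fun c => !decide (c ∈ puncA)) := by
  induction w generalizing acc with
  | nil => simp
  | cons c cs ih =>
    rw [List.foldl_cons, List.filter_cons]
    by_cases h : c ∈ puncA <;> simp [h, ih]

theorem foldl_append_map (l : List (List Char)) (acc : List String) :
    l.foldl (fun nf parola =>
        nf ++ [String.ofList (parola.filter (fun c => !decide (c ∈ puncA)))]) acc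
      = acc ++ l.map (fun parola => String.ofList (parola.filter (fun c => !decide (c ∈ puncA)))) := by
  induction l generalizing acc with
  | nil => simp
  | cons x xs ih =>
    rw [List.foldl_cons, ih]
    simp

theorem frase_eq (frase : String) :
    (PySem.Chars.splitOn frase.toList [' ']).foldl (fun nuova_frase parola =>
      let parola_corrente := parola.foldl (fun parola_corrente c =>
        let non_aggiungere_carattere :=
          puncA.foldl (fun flag el => if el == c then true else flag) false
        if !non_aggiungere_carattere then parola_corrente ++ [c] else parola_corrente)
        ([] : List Char)
      nuova_frase ++ [String.ofList parola_corrente]) []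
    = (PySem.Chars.splitOn (frase.toList.filter (fun c => !puncB.contains c)) [' ']).map String.ofList := by
  have hq : (fun c : Char => !decide (c ∈ puncA)) ' ' = true := by decide
  have hpb : (fun c : Char => !puncB.contains c) = (fun c : Char => !decide (c ∈ puncA)) := by
    funext c
    rw [show puncB = puncA from rfl]
    simp
  rw [List.foldl_ext _
      (fun nuova_frase parola =>
        nuova_frase ++ [String.ofList (parola.filter (fun c => !decide (c ∈ puncA)))]) []
      (by intro a parola _; rw [body_eq, word_eq]; simp)]
  rw [foldl_append_map (PySem.Chars.splitOn frase.toList [' ']) []]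
  rw [hpb, splitOn_space, splitOn_space,
    pvSplit_filter (fun c : Char => !decide (c ∈ puncA)) hq frase.toList]
  simp

-- ===== VERDICT (by name: the statement is the Claim_ definition above) =====
theorem rimozione_punteggiatura_da_un_documento_spec : Claim_equal_rimozione_punteggiatura_da_un_documento := by
  intro documento hdom
  clear hdom
  unfold Spec_rimozione_punteggiatura_da_un_documento
  unfold rimozione_punteggiatura_da_un_documento rimozione_punteggiatura_da_un_documento_alt
  have key : ∀ (acc : List (List String)),
      documento.foldl (fun nuovo_documento frase =>
        let frase_splittata := PySem.Chars.splitOn frase.toList [' ']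
        let nuova_frase := frase_splittata.foldl (fun nuova_frase parola =>
          let parola_corrente := parola.foldl (fun parola_corrente c =>
            let non_aggiungere_carattere :=
              puncA.foldl (fun flag el => if el == c then true else flag) false
            if !non_aggiungere_carattere then parola_corrente ++ [c] else parola_corrente)
            ([] : List Char)
          nuova_frase ++ [String.ofList parola_corrente]) []
        nuovo_documento ++ [nuova_frase]) acc
      = acc ++ documento.map (fun frase =>
          (PySem.Chars.splitOn (frase.toList.filter (fun c => !puncB.contains c)) [' ']).map String.ofList) := by
    induction documento with
    | nil => simp
    | cons frase rest ih =>
      intro acc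
      simp only [List.foldl_cons, List.map_cons]
      rw [frase_eq frase, ih]
      simp
  simpa using key []
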